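-- pv_equiv track=rewrite | github.com/maddingue/ponysay | ponysay.py | __getcolour
-- ===== SOURCE A (Python) =====
-- def __getcolour(input, offset):
--     (i, n) = (offset, len(input))
--     rc = input[i]
--     i += 1
--     if i == n: return rc
--     c = input[i]
--     i += 1
--     rc += c
--
--     if c == ']':
--         if i == n: return rc
--         c = input[i]
--         i += 1
--         rc += c
--         if c == 'P':
--             di = 0
--             while (di < 7) and (i < n):
--                 c = input[i]
--                 i += 1
--                 di += 1
--                 rc += c
--     elif c == '[':
--         while i < n:
--             c = input[i]
--             i += 1
--             rc += c
--             if (c == '~') or (('a' <= c) and (c <= 'z')) or (('A' <= c) and (c <= 'Z')):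
--                 break
--
--     return rc
-- ===== SOURCE B (Python) =====
-- def __getcolour(input, offset):
--     first = input[offset]          # the mandatory first character (IndexError exactly where A's first read raises)
--     s = input[offset:]
--     if s[1:2] == ']':
--         k = 10 if s[2:3] == 'P' else 3
--     elif s[1:2] == '[':
--         k = next((j + 1 for j in range(2, len(s)) if s[j] == '~' or s[j].isalpha()), len(s))
--     else:
--         k = 2
--     return first + s[1:k]
-- ===== Notes on version B (the rewrite author's own statement) =====
-- stated objective: simpler
-- what changed: B slices the suffix s = input[offset:] once, determines the token length by a single case analysis (10 for ']P', 3 for ']', first-terminator position for '[', else 2) with one generator search, and returns one slice, instead of A's character-by-character index walk with a mutable accumulator and early returns.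
-- intended difference: For negative offsets whose escape token runs past the end of the string, A's negative indexing wraps around and keeps reading characters from the front of the string (e.g. A('ab', -1) = 'ba'), while B stops at the end of the string and returns the truncated token ('b'), which is the intended truncation behaviour. — e.g. on __getcolour("ab", -1): A returns "ba", B returns "b"
import Mathlib
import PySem

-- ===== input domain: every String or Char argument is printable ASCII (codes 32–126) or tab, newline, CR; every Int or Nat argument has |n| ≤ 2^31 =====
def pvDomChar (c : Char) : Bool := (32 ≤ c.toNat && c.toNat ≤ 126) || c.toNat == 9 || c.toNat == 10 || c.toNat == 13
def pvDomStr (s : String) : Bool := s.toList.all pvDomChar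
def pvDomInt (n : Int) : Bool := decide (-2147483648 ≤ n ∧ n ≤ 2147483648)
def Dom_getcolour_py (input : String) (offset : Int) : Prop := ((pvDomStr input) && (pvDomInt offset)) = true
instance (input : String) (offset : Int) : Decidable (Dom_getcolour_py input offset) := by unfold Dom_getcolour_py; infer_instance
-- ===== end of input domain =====

-- B computes the token length by one case analysis plus a single terminator search and takes one
-- slice, instead of A's char-by-char index walk with a mutable accumulator (objective: simpler).

-- ===== PORT A =====
-- A reads input[i]; every read is in range on Pre_ (where the Python indexing succeeds), so the
-- total read with a junk default is exact there.
def pvGetA (l : List Char) (i : Int) : Char := (PySem.List.pyGet? l i).getD ' '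

def pvTermA (c : Char) : Bool := c == '~' || (('a' ≤ c) && (c ≤ 'z')) || (('A' ≤ c) && (c ≤ 'Z'))

-- the 'while (di < 7) and (i < n)' loop of the ']P' branch
def pvLoopP (l : List Char) (n i di : Int) (rc : List Char) : List Char :=
  if _h : di < 7 ∧ i < n then pvLoopP l n (i + 1) (di + 1) (rc ++ [pvGetA l i]) else rc
  termination_by (7 - di).toNat
  decreasing_by omega

-- the 'while i < n' loop of the '[' branch
def pvLoopBr (l : List Char) (n i : Int) (rc : List Char) : List Char :=
  if _h : i < n then
    (let c := pvGetA l i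
     if pvTermA c then rc ++ [c] else pvLoopBr l n (i + 1) (rc ++ [c]))
  else rc
  termination_by (n - i).toNat
  decreasing_by omega

def getcolour_py (input : String) (offset : Int) : String :=
  let l := input.toList
  let n : Int := l.length
  let i := offset
  let rc : List Char := [pvGetA l i]
  let i := i + 1
  if i = n then String.ofList rc else
  let c := pvGetA l i
  let i := i + 1
  let rc := rc ++ [c]
  if c = ']' then
    (if i = n then String.ofList rc else
     let c := pvGetA l i
     let i := i + 1
     let rc := rc ++ [c]
     if c = 'P' then String.ofList (pvLoopP l n i 0 rc) else String.ofList rc)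
  else if c = '[' then String.ofList (pvLoopBr l n i rc)
  else String.ofList rc

-- ===== PORT B =====
-- Source B's 's[j] == "~" or s[j].isalpha()'; the index j is in range wherever it is evaluated
def pvTermB (s : List Char) (j : Int) : Bool :=
  ((PySem.List.pyGet? s j).getD ' ' == '~') || PySem.Chars.isalpha ((PySem.List.pyGet? s j).getD ' ')

def getcolour_py_alt (input : String) (offset : Int) : String :=
  -- first = input[offset]: the same total read helper; in range under Pre_ (none = IndexError)
  let first := pvGetA input.toList offset
  let s := PySem.List.slice input.toList (some offset) none
  let k : Int :=
    if PySem.List.slice s (some 1) (some 2) = [']'] then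
      (if PySem.List.slice s (some 2) (some 3) = ['P'] then 10 else 3)
    else if PySem.List.slice s (some 1) (some 2) = ['['] then
      -- next((j + 1 for j in range(2, len(s)) if …), len(s)) as first-match search over the range
      (match (PySem.List.pyRange 2 (s.length : Int) 1).find? (fun j => pvTermB s j) with
       | some j => j + 1
       | none => (s.length : Int))
    else 2
  String.ofList (first :: PySem.List.slice s (some 1) (some k))

-- ===== PRECONDITION & SPEC =====
-- Pre_: exactly the offsets on which Python's input[offset] (first read of A) succeeds
def Pre_getcolour_py (input : String) (offset : Int) : Prop :=
  -(input.toList.length : Int) ≤ offset ∧ offset < (input.toList.length : Int)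
instance (input : String) (offset : Int) : Decidable (Pre_getcolour_py input offset) := by
  unfold Pre_getcolour_py; infer_instance

def pvWitness_getcolour_py : String × Int := ("x]Phello", 0)

-- the escape token starting at t would need more characters than t has
def pvRunOff (t : List Char) : Prop :=
  if t[1]? = some '[' then ∀ c ∈ t.drop 2, pvTermA c = false
  else t.length < if t[1]? = some ']' then if t[2]? = some 'P' then 10 else 3 else 2

-- For negative offsets whose escape token runs past the end of the string, A's negative indexing
-- wraps around and keeps reading characters from the FRONT of the string, while B stops at the end
-- of the string — the intended truncation.
def D_getcolour_py (input : String) (offset : Int) : Prop :=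
  offset < 0 ∧ -(input.toList.length : Int) ≤ offset ∧
  pvRunOff (input.toList.drop ((input.toList.length : Int) + offset).toNat)
instance (input : String) (offset : Int) : Decidable (D_getcolour_py input offset) := by
  unfold D_getcolour_py pvRunOff; infer_instance

def Spec_getcolour_py (input : String) (offset : Int) (out : String) : Prop :=
  ¬ D_getcolour_py input offset → out = getcolour_py_alt input offset
instance (input : String) (offset : Int) (out : String) : Decidable (Spec_getcolour_py input offset out) := by
  unfold Spec_getcolour_py; infer_instance

def pvDiffWitness_getcolour_py : String × Int := ("ab", -1)
def pvDiffWitnessOut_getcolour_py : String × String := ("ba", "b")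

-- ===== CLAIM (what is proved, stated in full; the proofs are below) =====
def Claim_unchanged_getcolour_py : Prop := ∀ (input : String) (offset : Int), Dom_getcolour_py input offset → Pre_getcolour_py input offset → Spec_getcolour_py input offset (getcolour_py input offset)
def Claim_changed_getcolour_py : Prop := Dom_getcolour_py (pvDiffWitness_getcolour_py.1) (pvDiffWitness_getcolour_py.2) ∧ Pre_getcolour_py (pvDiffWitness_getcolour_py.1) (pvDiffWitness_getcolour_py.2) ∧ D_getcolour_py (pvDiffWitness_getcolour_py.1) (pvDiffWitness_getcolour_py.2) ∧ getcolour_py (pvDiffWitness_getcolour_py.1) (pvDiffWitness_getcolour_py.2) = pvDiffWitnessOut_getcolour_py.1 ∧ getcolour_py_alt (pvDiffWitness_getcolour_py.1) (pvDiffWitness_getcolour_py.2) = pvDiffWitnessOut_getcolour_py.2 ∧ pvDiffWitnessOut_getcolour_py.1 ≠ pvDiffWitnessOut_getcolour_py.2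

-- ===== LEMMAS AND PROOFS =====

-- the token tail of the '[' branch: everything up to and including the first terminator
def pvTakeIncl : List Char → List Char
  | [] => []
  | c :: r => if pvTermA c then [c] else c :: pvTakeIncl r

theorem pvTermB_eq (s : List Char) (j : Int) :
    pvTermB s j = pvTermA ((PySem.List.pyGet? s j).getD ' ') := by
  unfold pvTermB pvTermA PySem.Chars.isalpha PySem.Chars.isupper PySem.Chars.islower
  generalize (PySem.List.pyGet? s j).getD ' ' = c
  cases h1 : decide ('a' ≤ c) <;> cases h2 : decide (c ≤ 'z') <;> cases h3 : decide ('A' ≤ c) <;>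
    cases h4 : decide (c ≤ 'Z') <;> cases h5 : (c == '~') <;> simp_all

theorem pvGetA_nonneg (l : List Char) (i : Int) (h0 : 0 ≤ i) (h : i.toNat < l.length) :
    pvGetA l i = l[i.toNat] := by
  simp [pvGetA, PySem.List.pyGet?_of_nonneg _ h0, List.getElem?_eq_getElem h]

theorem pvGetA_neg (l : List Char) (i : Int) (h0 : i < 0) (h : -(l.length : Int) ≤ i) :
    pvGetA l i = l[(i + l.length).toNat]'(by omega) := by
  have hn : ¬ (0 ≤ i) := by omega
  have hk : l.length - (-i).toNat = (i + l.length).toNat := by omega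
  have hlt : (i + l.length).toNat < l.length := by omega
  simp only [pvGetA, PySem.List.pyGet?, PySem.List.pyIdx?, if_neg hn, if_pos h, hk,
    Option.bind_some, List.getElem?_eq_getElem hlt, Option.getD_some]

theorem pvLoopBr_nonneg (l : List Char) :
    ∀ (rest : List Char) (i : Int) (rc : List Char), 0 ≤ i → rest = l.drop i.toNat →
    pvLoopBr l l.length i rc = rc ++ pvTakeIncl rest := by
  intro rest
  induction rest with
  | nil =>
    intro i rc h0 hrest
    have hlen : l.length ≤ i.toNat := by
      have := congrArg List.length hrest; simp at this; omega
    rw [pvLoopBr, dif_neg (by omega)]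
    simp [pvTakeIncl]
  | cons c r ih =>
    intro i rc h0 hrest
    have hlt : i.toNat < l.length := by
      have := congrArg List.length hrest; simp at this; omega
    have hc : pvGetA l i = c := by
      rw [pvGetA_nonneg l i h0 hlt]
      have h2 : l[i.toNat + 0]? = some c := by rw [← List.getElem?_drop, ← hrest]; rfl
      simp only [Nat.add_zero, List.getElem?_eq_getElem hlt, Option.some_inj] at h2
      exact h2
    have hr : r = l.drop (i + 1).toNat := by
      have : (l.drop i.toNat).tail = r := by rw [← hrest]; rfl
      rw [List.tail_drop] at this
      rw [← this]; congr 1; omega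
    rw [pvLoopBr, dif_pos (by omega)]
    simp only [hc]
    by_cases ht : pvTermA c
    · simp [ht, pvTakeIncl]
    · simp only [ht, Bool.false_eq_true, if_false, pvTakeIncl]
      rw [ih (i + 1) (rc ++ [c]) (by omega) hr]
      simp

theorem pvLoopBr_neg (l : List Char) :
    ∀ (rest : List Char) (i : Int) (rc : List Char),
    i + rest.length ≤ 0 → -(l.length : Int) ≤ i → rest = l.drop (i + l.length).toNat →
    (∃ c ∈ rest, pvTermA c = true) →
    pvLoopBr l l.length i rc = rc ++ pvTakeIncl rest := by
  intro rest
  induction rest with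
  | nil => intro i rc _ _ _ hex; simp at hex
  | cons c r ih =>
    intro i rc hup hlow hrest hex
    have hneg : i < 0 := by simp at hup; omega
    have hn0 : 0 < l.length := by omega
    have hlt : (i + l.length).toNat < l.length := by omega
    have hc : pvGetA l i = c := by
      rw [pvGetA_neg l i hneg hlow]
      have h2 : l[(i + l.length).toNat + 0]? = some c := by
        rw [← List.getElem?_drop, ← hrest]; rfl
      simp only [Nat.add_zero, List.getElem?_eq_getElem hlt, Option.some_inj] at h2
      exact h2
    have hr : r = l.drop ((i + 1) + l.length).toNat := by
      have : (l.drop (i + l.length).toNat).tail = r := by rw [← hrest]; rfl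
      rw [List.tail_drop] at this
      rw [← this]; congr 1; omega
    rw [pvLoopBr, dif_pos (by omega)]
    simp only [hc]
    by_cases ht : pvTermA c
    · simp [ht, pvTakeIncl]
    · simp only [ht, Bool.false_eq_true, if_false, pvTakeIncl]
      have hex' : ∃ c' ∈ r, pvTermA c' = true := by
        rcases hex with ⟨c', hmem, hterm⟩
        rcases List.mem_cons.mp hmem with h | h
        · exact absurd (h ▸ hterm) ht
        · exact ⟨c', h, hterm⟩
      rw [ih (i + 1) (rc ++ [c]) (by simp at hup ⊢; omega) (by omega) hr hex']
      simp

theorem pvLoopP_nonneg (l : List Char) :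
    ∀ (d7 : Nat) (i : Int) (rc : List Char), d7 ≤ 7 → 0 ≤ i →
    pvLoopP l l.length i (7 - (d7 : Int)) rc = rc ++ (l.drop i.toNat).take d7 := by
  intro d7
  induction d7 with
  | zero => intro i rc _ _; rw [pvLoopP, dif_neg (by omega)]; simp
  | succ d7 ih =>
    intro i rc hle h0
    by_cases hlt : i < (l.length : Int)
    · rw [pvLoopP, dif_pos ⟨by push_cast; omega, hlt⟩]
      have harg : (7 : Int) - ((d7 + 1 : Nat) : Int) + 1 = 7 - (d7 : Int) := by push_cast; omega
      rw [harg, ih (i + 1) (rc ++ [pvGetA l i]) (by omega) (by omega)]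
      have hlt' : i.toNat < l.length := by omega
      have hdrop : l.drop i.toNat = l[i.toNat] :: l.drop (i.toNat + 1) :=
        List.drop_eq_getElem_cons hlt'
      rw [pvGetA_nonneg l i h0 hlt']
      have h1 : (i + 1).toNat = i.toNat + 1 := by omega
      rw [h1, hdrop, List.take_succ_cons, List.append_assoc]
      rfl
    · rw [pvLoopP, dif_neg (by omega)]
      have : l.drop i.toNat = [] := List.drop_eq_nil_of_le (by omega)
      simp [this]

theorem pvLoopP_neg (l : List Char) :
    ∀ (d7 : Nat) (i : Int) (rc : List Char), d7 ≤ 7 → i + d7 ≤ 0 → -(l.length : Int) ≤ i →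
    pvLoopP l l.length i (7 - (d7 : Int)) rc = rc ++ (l.drop (i + l.length).toNat).take d7 := by
  intro d7
  induction d7 with
  | zero => intro i rc _ _ _; rw [pvLoopP, dif_neg (by omega)]; simp
  | succ d7 ih =>
    intro i rc hle hup hlow
    have hneg : i < 0 := by push_cast at hup; omega
    have hn0 : 0 < l.length := by omega
    rw [pvLoopP, dif_pos ⟨by push_cast; omega, by omega⟩]
    have harg : (7 : Int) - ((d7 + 1 : Nat) : Int) + 1 = 7 - (d7 : Int) := by push_cast; omega
    rw [harg, ih (i + 1) (rc ++ [pvGetA l i]) (by omega) (by push_cast at hup ⊢; omega) (by omega)]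
    have hlt' : (i + l.length).toNat < l.length := by omega
    have hdrop : l.drop (i + l.length).toNat =
        l[(i + l.length).toNat] :: l.drop ((i + l.length).toNat + 1) :=
      List.drop_eq_getElem_cons hlt'
    rw [pvGetA_neg l i hneg hlow]
    have h1 : ((i + 1) + l.length).toNat = (i + l.length).toNat + 1 := by omega
    rw [h1, hdrop, List.take_succ_cons, List.append_assoc]
    rfl

-- B's terminator search over range(2, len(s)) computes the '[' token
theorem pvFind_takeIncl (s : List Char) :
    ∀ (rest : List Char) (a : Nat), rest = s.drop a → a ≤ s.length →
    PySem.List.slice s none (some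
      (match (PySem.List.pyRange (a : Int) (s.length : Int) 1).find? (fun j => pvTermB s j) with
       | some j => j + 1
       | none => (s.length : Int))) = s.take a ++ pvTakeIncl rest := by
  intro rest
  induction rest with
  | nil =>
    intro a hrest hle
    have ha : a = s.length := by
      have := congrArg List.length hrest; simp at this; omega
    rw [PySem.List.pyRange_one_eq_nil (by omega)]
    simp only [List.find?_nil, pvTakeIncl, ha, List.append_nil,
      PySem.List.slice_to_natCast s s.length, List.take_length]
  | cons c r ih =>
    intro a hrest hle
    have hlt : a < s.length := by
      have := congrArg List.length hrest; simp at this; omega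
    have hc : s[a]'hlt = c := by
      have h2 : s[a + 0]? = some c := by rw [← List.getElem?_drop, ← hrest]; rfl
      simp only [Nat.add_zero, List.getElem?_eq_getElem hlt, Option.some_inj] at h2
      exact h2
    have hr : r = s.drop (a + 1) := by
      have : (s.drop a).tail = r := by rw [← hrest]; rfl
      rw [List.tail_drop] at this; exact this.symm
    rw [PySem.List.pyRange_one_cons (by omega)]
    rw [List.find?_cons]
    by_cases ht : pvTermB s (a : Int)
    · simp only [ht]
      have hterm : pvTermA c := by
        rw [pvTermB_eq] at ht
        rwa [PySem.List.pyGet?_natCast, List.getElem?_eq_getElem hlt, Option.getD_some, hc] at ht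
      have : PySem.List.slice s none (some ((a : Int) + 1)) = s.take (a + 1) := by
        rw [PySem.List.slice_to s (by omega)]; congr 1
      rw [this]
      rw [List.take_add_one, List.getElem?_eq_getElem hlt, hc]
      simp [pvTakeIncl, hterm]
    · simp only [ht]
      have hcast : (a : Int) + 1 = ((a + 1 : Nat) : Int) := by push_cast; ring
      rw [hcast, ih (a + 1) hr (by omega)]
      have hterm : ¬ pvTermA c := by
        rw [pvTermB_eq] at ht
        rwa [PySem.List.pyGet?_natCast, List.getElem?_eq_getElem hlt, Option.getD_some, hc] at ht
      rw [List.take_add_one, List.getElem?_eq_getElem hlt, hc]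
      simp [pvTakeIncl, hterm]

-- ===== VERDICT (by name: the statement is the Claim_ definition above) =====
-- slices s[1:2] and s[2:3] of Source B, resolved to drop/take
theorem pvSlice12 (xs : List Char) :
    PySem.List.slice xs (some 1) (some 2) = (xs.drop 1).take 1 := by
  rw [PySem.List.slice_toNat xs (by norm_num) (by norm_num)]; rfl

theorem pvSlice23 (xs : List Char) :
    PySem.List.slice xs (some 2) (some 3) = (xs.drop 2).take 1 := by
  rw [PySem.List.slice_toNat xs (by norm_num) (by norm_num)]; rfl

-- Source B's s[1:k] is s[:k] without its head
theorem pvSlice1k (xs : List Char) (k : Int) (hk : 0 ≤ k) :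
    PySem.List.slice xs (some 1) (some k) = (PySem.List.slice xs none (some k)).drop 1 := by
  rw [PySem.List.slice_toNat xs (by norm_num) hk, PySem.List.slice_to xs hk, List.drop_take]; rfl

theorem pvFind_nonneg (s : List Char) :
    0 ≤ (match (PySem.List.pyRange 2 (s.length : Int) 1).find? (fun j => pvTermB s j) with
         | some j => j + 1
         | none => (s.length : Int)) := by
  cases h : (PySem.List.pyRange 2 (s.length : Int) 1).find? (fun j => pvTermB s j) with
  | none => exact Int.natCast_nonneg _
  | some j =>
    have hj := List.mem_of_find?_eq_some h
    rw [PySem.List.mem_pyRange_one] at hj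
    show 0 ≤ j + 1
    omega

theorem getcolour_py_spec : Claim_unchanged_getcolour_py := by
  intro input offset hDom hPre hnD
  have hPre' := hPre; unfold Pre_getcolour_py at hPre'
  obtain ⟨hlow, hhigh⟩ := hPre'
  show getcolour_py input offset = getcolour_py_alt input offset
  simp only [getcolour_py, getcolour_py_alt]
  by_cases hpos : 0 ≤ offset
  · -- 0 ≤ offset: A never wraps; both sides parse the suffix l.drop offset.toNat
    rw [PySem.List.slice_from input.toList hpos]
    have h2 : ∀ d : Nat, input.toList[offset.toNat + d]? = (input.toList.drop offset.toNat)[d]? := by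
      intro d; rw [List.getElem?_drop]
    rcases hts : input.toList.drop offset.toNat with _ | ⟨c0, t1⟩
    · exfalso
      have := congrArg List.length hts
      simp only [List.length_drop, List.length_nil] at this; omega
    rcases t1 with _ | ⟨c1, rest⟩
    · -- one-character suffix: A returns at the first boundary check, B takes s[:2] = s
      have hlen : input.toList.length = offset.toNat + 1 := by
        have := congrArg List.length hts
        simp only [List.length_drop, List.length_nil, List.length_cons] at this; omega
      have hc0 : pvGetA input.toList offset = c0 := by
        rw [pvGetA_nonneg input.toList offset hpos (by omega)]
        have h3 := h2 0
        rw [hts] at h3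
        simp only [Nat.add_zero,
          List.getElem?_eq_getElem (by omega : offset.toNat < input.toList.length)] at h3
        simpa using h3
      rw [if_pos (show offset + 1 = (input.toList.length : Int) by omega), hc0]
      rw [if_neg (show ¬ (PySem.List.slice [c0] (some 1) (some 2) = [']']) by
            rw [pvSlice12]; simp),
          if_neg (show ¬ (PySem.List.slice [c0] (some 1) (some 2) = ['[']) by
            rw [pvSlice12]; simp)]
      rw [pvSlice1k _ _ (by norm_num), PySem.List.slice_to _ (by norm_num)]
      rfl
    · -- at least two characters in the suffix
      have hlen : input.toList.length = offset.toNat + 2 + rest.length := by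
        have := congrArg List.length hts
        simp only [List.length_drop, List.length_cons] at this; omega
      have hcAt : ∀ (i : Int) (d : Nat) (c : Char), i = offset + d →
          (c0 :: c1 :: rest)[d]? = some c → pvGetA input.toList i = c := by
        intro i d c hi hd
        obtain ⟨hdlt, hval⟩ := List.getElem?_eq_some_iff.mp hd
        simp only [List.length_cons] at hdlt
        rw [pvGetA_nonneg input.toList i (by omega) (by omega)]
        have h3 := h2 d
        rw [hts, hd] at h3
        have hidx : i.toNat = offset.toNat + d := by omega
        rw [List.getElem?_eq_getElem (by omega)] at h3
        simp only [hidx]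
        exact Option.some.inj h3
      have hc0 : pvGetA input.toList offset = c0 := hcAt offset 0 c0 (by push_cast; ring) rfl
      have hc1 : pvGetA input.toList (offset + 1) = c1 := hcAt (offset + 1) 1 c1 (by push_cast; ring) rfl
      rw [if_neg (show ¬ (offset + 1 = (input.toList.length : Int)) by omega), hc0, hc1]
      by_cases hbr1 : c1 = ']'
      · rw [if_pos hbr1,
            if_pos (show PySem.List.slice (c0 :: c1 :: rest) (some 1) (some 2) = [']'] by
              rw [pvSlice12]; simp [hbr1])]
        rcases rest with _ | ⟨c2, r2⟩
        · -- "x]" at the very end of the string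
          rw [if_pos (show offset + 1 + 1 = (input.toList.length : Int) by
                simp only [List.length_nil] at hlen; omega)]
          rw [if_neg (show ¬ (PySem.List.slice [c0, c1] (some 2) (some 3) = ['P']) by
                rw [pvSlice23]; simp)]
          rw [pvSlice1k _ _ (by norm_num), PySem.List.slice_to _ (by norm_num)]
          rfl
        · rw [if_neg (show ¬ (offset + 1 + 1 = (input.toList.length : Int)) by
                simp only [List.length_cons] at hlen; omega)]
          have hc2 : pvGetA input.toList (offset + 1 + 1) = c2 :=
            hcAt (offset + 1 + 1) 2 c2 (by push_cast; ring) rfl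
          rw [hc2]
          by_cases hP : c2 = 'P'
          · rw [if_pos hP,
                if_pos (show PySem.List.slice (c0 :: c1 :: c2 :: r2) (some 2) (some 3) = ['P'] by
                  rw [pvSlice23]; simp [hP])]
            have hploop := pvLoopP_nonneg input.toList 7 (offset + 1 + 1 + 1)
              ([c0] ++ [c1] ++ [c2]) (le_refl 7) (by omega)
            rw [show (7 : Int) - ((7 : Nat) : Int) = 0 by norm_num] at hploop
            rw [hploop]
            have hdrop3 : input.toList.drop (offset + 1 + 1 + 1).toNat = r2 := by
              rw [show (offset + 1 + 1 + 1).toNat = offset.toNat + 3 by omega,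
                ← List.drop_drop (j := offset.toNat) (i := 3), hts]
              rfl
            rw [hdrop3, pvSlice1k _ _ (by norm_num), PySem.List.slice_to _ (by norm_num)]
            rfl
          · rw [if_neg hP,
                if_neg (show ¬ (PySem.List.slice (c0 :: c1 :: c2 :: r2) (some 2) (some 3) = ['P']) by
                  rw [pvSlice23]; simp [hP])]
            rw [pvSlice1k _ _ (by norm_num), PySem.List.slice_to _ (by norm_num)]
            rfl
      · rw [if_neg hbr1,
            if_neg (show ¬ (PySem.List.slice (c0 :: c1 :: rest) (some 1) (some 2) = [']']) by
              rw [pvSlice12]; simp [hbr1])]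
        by_cases hbr2 : c1 = '['
        · rw [if_pos hbr2,
              if_pos (show PySem.List.slice (c0 :: c1 :: rest) (some 1) (some 2) = ['['] by
                rw [pvSlice12]; simp [hbr2])]
          have hdrop2 : rest = input.toList.drop (offset + 1 + 1).toNat := by
            rw [show (offset + 1 + 1).toNat = offset.toNat + 2 by omega,
              ← List.drop_drop (j := offset.toNat) (i := 2), hts]
            rfl
          rw [pvLoopBr_nonneg input.toList rest (offset + 1 + 1) ([c0] ++ [c1]) (by omega) hdrop2]
          have hfind := pvFind_takeIncl (c0 :: c1 :: rest) rest 2 rfl (by simp)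
          rw [show ((2 : Nat) : Int) = (2 : Int) from rfl] at hfind
          rw [pvSlice1k _ _ (pvFind_nonneg _), hfind]
          rfl
        · rw [if_neg hbr2,
              if_neg (show ¬ (PySem.List.slice (c0 :: c1 :: rest) (some 1) (some 2) = ['[']) by
                rw [pvSlice12]; simp [hbr2])]
          rw [pvSlice1k _ _ (by norm_num), PySem.List.slice_to _ (by norm_num)]
          rfl
  · -- -len ≤ offset < 0: both sides read the suffix of length -offset; outside D_, A's walk
    -- never runs past the end of the string, so it stays inside that suffix
    have hneg : offset < 0 := by omega
    rw [show PySem.List.slice input.toList (some offset) =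
        input.toList.drop (offset + (input.toList.length : Int)).toNat from by
      rw [PySem.List.slice_some_none]
      congr 1
      unfold PySem.List.clampIdx
      rw [if_pos hneg, if_neg (by omega)]
      omega]
    have hE : ¬ pvRunOff (input.toList.drop (offset + (input.toList.length : Int)).toNat) := by
      intro hE
      apply hnD
      refine ⟨hneg, hlow, ?_⟩
      rw [show ((input.toList.length : Int) + offset).toNat =
          (offset + (input.toList.length : Int)).toNat by omega]
      exact hE
    have h2 : ∀ d : Nat, input.toList[(offset + (input.toList.length : Int)).toNat + d]? =
        (input.toList.drop (offset + (input.toList.length : Int)).toNat)[d]? := by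
      intro d; rw [List.getElem?_drop]
    rcases hts : input.toList.drop (offset + (input.toList.length : Int)).toNat
      with _ | ⟨c0, t1⟩
    · exfalso
      have := congrArg List.length hts
      simp only [List.length_drop, List.length_nil] at this; omega
    rcases t1 with _ | ⟨c1, rest⟩
    · exact absurd (by rw [hts]; simp [pvRunOff]) hE
    · have hlen : input.toList.length =
          (offset + (input.toList.length : Int)).toNat + 2 + rest.length := by
        have := congrArg List.length hts
        simp only [List.length_drop, List.length_cons] at this; omega
      have hcAt : ∀ (i : Int) (d : Nat) (c : Char), i = offset + d → (d : Int) < -offset →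
          (c0 :: c1 :: rest)[d]? = some c → pvGetA input.toList i = c := by
        intro i d c hi hd hdval
        obtain ⟨hdlt, hval⟩ := List.getElem?_eq_some_iff.mp hdval
        simp only [List.length_cons] at hdlt
        have hi0 : i < 0 := by omega
        rw [pvGetA_neg input.toList i hi0 (by omega)]
        have h3 := h2 d
        rw [hts, hdval] at h3
        rw [List.getElem?_eq_getElem (by omega)] at h3
        simp only [show (i + (input.toList.length : Int)).toNat =
          (offset + (input.toList.length : Int)).toNat + d by omega]
        exact Option.some.inj h3
      have hm2 : (2 : Int) ≤ -offset := by omega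
      have hc0 : pvGetA input.toList offset = c0 :=
        hcAt offset 0 c0 (by push_cast; ring) (by omega) rfl
      have hc1 : pvGetA input.toList (offset + 1) = c1 :=
        hcAt (offset + 1) 1 c1 (by push_cast; ring) (by omega) rfl
      rw [if_neg (show ¬ (offset + 1 = (input.toList.length : Int)) by omega), hc0, hc1]
      by_cases hbr1 : c1 = ']'
      · rw [if_pos hbr1,
            if_pos (show PySem.List.slice (c0 :: c1 :: rest) (some 1) (some 2) = [']'] by
              rw [pvSlice12]; simp [hbr1])]
        rcases rest with _ | ⟨c2, r2⟩
        · -- excluded by D_: a ']' token cut off by the end of the suffix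
          exact absurd (by rw [hts, hbr1]; simp [pvRunOff]) hE
        · have hm3 : (3 : Int) ≤ -offset := by
            simp only [List.length_cons] at hlen; omega
          rw [if_neg (show ¬ (offset + 1 + 1 = (input.toList.length : Int)) by omega)]
          have hc2 : pvGetA input.toList (offset + 1 + 1) = c2 :=
            hcAt (offset + 1 + 1) 2 c2 (by push_cast; ring) (by omega) rfl
          rw [hc2]
          by_cases hP : c2 = 'P'
          · have h10 : ¬ (c0 :: c1 :: c2 :: r2).length < 10 := by
              intro hlt
              apply hE
              rw [hts, hbr1, hP]
              simp only [pvRunOff]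
              rw [if_neg (show ¬((c0 :: ']' :: 'P' :: r2)[1]? = some '[') by simp),
                  if_pos (show (c0 :: ']' :: 'P' :: r2)[1]? = some ']' from rfl),
                  if_pos (show (c0 :: ']' :: 'P' :: r2)[2]? = some 'P' from rfl)]
              simp only [List.length_cons] at hlt ⊢
              exact hlt
            simp only [List.length_cons] at h10
            have hm10 : (10 : Int) ≤ -offset := by
              simp only [List.length_cons] at hlen; omega
            rw [if_pos hP,
                if_pos (show PySem.List.slice (c0 :: c1 :: c2 :: r2) (some 2) (some 3) = ['P'] by
                  rw [pvSlice23]; simp [hP])]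
            have hploop := pvLoopP_neg input.toList 7 (offset + 1 + 1 + 1)
              ([c0] ++ [c1] ++ [c2]) (le_refl 7) (by omega) (by omega)
            rw [show (7 : Int) - ((7 : Nat) : Int) = 0 by norm_num] at hploop
            rw [hploop]
            have hdrop3 : input.toList.drop
                ((offset + 1 + 1 + 1) + (input.toList.length : Int)).toNat = r2 := by
              rw [show ((offset + 1 + 1 + 1) + (input.toList.length : Int)).toNat =
                  (offset + (input.toList.length : Int)).toNat + 3 by omega,
                ← List.drop_drop (j := (offset + (input.toList.length : Int)).toNat) (i := 3), hts]
              rfl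
            rw [hdrop3, pvSlice1k _ _ (by norm_num), PySem.List.slice_to _ (by norm_num)]
            rfl
          · rw [if_neg hP,
                if_neg (show ¬ (PySem.List.slice (c0 :: c1 :: c2 :: r2) (some 2) (some 3) = ['P']) by
                  rw [pvSlice23]; simp [hP])]
            rw [pvSlice1k _ _ (by norm_num), PySem.List.slice_to _ (by norm_num)]
            rfl
      · rw [if_neg hbr1,
            if_neg (show ¬ (PySem.List.slice (c0 :: c1 :: rest) (some 1) (some 2) = [']']) by
              rw [pvSlice12]; simp [hbr1])]
        by_cases hbr2 : c1 = '['
        · rw [if_pos hbr2,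
              if_pos (show PySem.List.slice (c0 :: c1 :: rest) (some 1) (some 2) = ['['] by
                rw [pvSlice12]; simp [hbr2])]
          have hexP : ∃ c ∈ rest, pvTermA c = true := by
            have hex : ∃ c ∈ rest, pvTermA c = true := by
              by_contra hall
              apply hE
              rw [hts, hbr2]
              simp only [pvRunOff]
              rw [if_pos (show (c0 :: '[' :: rest)[1]? = some '[' from rfl)]
              intro c hc
              cases hpc : pvTermA c
              · rfl
              · exact absurd ⟨c, hc, hpc⟩ hall
            exact hex
          have hdrop2 : rest = input.toList.drop
              ((offset + 1 + 1) + (input.toList.length : Int)).toNat := by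
            rw [show ((offset + 1 + 1) + (input.toList.length : Int)).toNat =
                (offset + (input.toList.length : Int)).toNat + 2 by omega,
              ← List.drop_drop (j := (offset + (input.toList.length : Int)).toNat) (i := 2), hts]
            rfl
          rw [pvLoopBr_neg input.toList rest (offset + 1 + 1) ([c0] ++ [c1])
            (by omega) (by omega) hdrop2 hexP]
          have hfind := pvFind_takeIncl (c0 :: c1 :: rest) rest 2 rfl (by simp)
          rw [show ((2 : Nat) : Int) = (2 : Int) from rfl] at hfind
          rw [pvSlice1k _ _ (pvFind_nonneg _), hfind]
          rfl
        · rw [if_neg hbr2,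
              if_neg (show ¬ (PySem.List.slice (c0 :: c1 :: rest) (some 1) (some 2) = ['[']) by
                rw [pvSlice12]; simp [hbr2])]
          rw [pvSlice1k _ _ (by norm_num), PySem.List.slice_to _ (by norm_num)]
          rfl

theorem getcolour_py_changed : Claim_changed_getcolour_py := by
  unfold Claim_changed_getcolour_py; decide
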